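-- pv_equiv track=rewrite | github.com/cocoxhuang/DyckTransformer | src/utils/utils.py | word_to_path
-- ===== SOURCE A (Python) =====
-- def word_to_path(tokens):
--     '''Convert a Dyck word (0/1 steps) into lattice path coordinates.
--
--     Interprets tokens as steps on a grid:
--     - `'0'`: East/right step (x + 1)
--     - `'1'`: North/up step (y + 1)
--
--     Args:
--         tokens: Iterable of step tokens (typically strings `'0'` and `'1'`).
--             Any other token is ignored.
--
--     Returns:
--         tuple[list[int], list[int]]: `(x_coords, y_coords)` starting at (0, 0),
--         suitable for plotting a polyline of the path.
--     '''
--     x_coords = [0]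
--     y_coords = [0]
--
--     for i, word in enumerate(tokens):
--         if word == '0':  # 0 in Dyck path (right step)
--             y_coords.append(y_coords[-1])
--             x_coords.append(x_coords[-1] + 1)
--         elif word == '1':  # 1 in Dyck path (up step)
--             y_coords.append(y_coords[-1] + 1)
--             x_coords.append(x_coords[-1])
--         else:
--             continue  # Ignore other tokens
--     return x_coords, y_coords
-- ===== SOURCE B (Python) =====
-- def word_to_path(tokens):
--     # Traverse the valid steps BACKWARDS, recording distances from the path's
--     # endpoint, then normalize by the endpoint at the end.
--     valid = [t for t in tokens if t == '0' or t == '1']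
--     rxs, rys = [0], [0]
--     dx = dy = 0
--     for t in reversed(valid):
--         if t == '0':
--             dx += 1
--         else:
--             dy += 1
--         rxs.append(dx)
--         rys.append(dy)
--     x_coords = [dx - r for r in reversed(rxs)]
--     y_coords = [dy - r for r in reversed(rys)]
--     return x_coords, y_coords
-- ===== Notes on version B (the rewrite author's own statement) =====
-- stated objective: alternative
-- what changed: B walks the valid steps in reverse, recording each point's (dx,dy) distance from the path's endpoint, and then produces the coordinates by reversing and subtracting from the endpoint totals, instead of A's forward loop that grows both coordinate lists from the origin.
import Mathlib
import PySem

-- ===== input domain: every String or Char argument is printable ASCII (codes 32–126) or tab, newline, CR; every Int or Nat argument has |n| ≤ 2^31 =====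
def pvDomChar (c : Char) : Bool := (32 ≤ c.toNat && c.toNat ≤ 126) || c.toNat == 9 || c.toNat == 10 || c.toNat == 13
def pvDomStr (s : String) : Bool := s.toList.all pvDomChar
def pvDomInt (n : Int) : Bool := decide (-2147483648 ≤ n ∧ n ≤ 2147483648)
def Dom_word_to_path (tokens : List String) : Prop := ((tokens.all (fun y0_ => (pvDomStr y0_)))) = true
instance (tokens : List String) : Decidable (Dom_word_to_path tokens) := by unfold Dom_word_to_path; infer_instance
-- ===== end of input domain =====

-- B traverses the valid steps in reverse, recording distances from the path's endpooint,
-- then normalizes by the endpoint totals; A grows both coordinate lists forwards (alternative).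


-- ===== PORT A =====
-- loop body of A: append to x_coords/y_coords according to the token, ignore others
def stepA (st : List Int × List Int) (word : String) : List Int × List Int :=
  if word = "0" then (st.1 ++ [st.1.getLast! + 1], st.2 ++ [st.2.getLast!])
  else if word = "1" then (st.1 ++ [st.1.getLast!], st.2 ++ [st.2.getLast! + 1])
  else st

def word_to_path (tokens : List String) : List Int × List Int :=
  tokens.foldl stepA ([0], [0])

-- ===== PORT B =====
-- backward loop body of B: bump dx or dy, append both to rxs/rys
def stepB (st : (List Int × List Int) × Int × Int) (t : String) : (List Int × List Int) × Int × Int :=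
  let dx := if t = "0" then st.2.1 + 1 else st.2.1
  let dy := if t = "0" then st.2.2 else st.2.2 + 1
  ((st.1.1 ++ [dx], st.1.2 ++ [dy]), dx, dy)

def word_to_path_alt (tokens : List String) : List Int × List Int :=
  let valid := tokens.filter (fun t => t == "0" || t == "1")
  let st := valid.reverse.foldl stepB (([0], [0]), 0, 0)
  ((st.1.1.reverse).map (fun r => st.2.1 - r), (st.1.2.reverse).map (fun r => st.2.2 - r))

-- ===== PRECONDITION & SPEC =====
def Spec_word_to_path (tokens : List String) (out : List Int × List Int) : Prop := out = word_to_path_alt tokens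
instance (tokens : List String) (out : List Int × List Int) : Decidable (Spec_word_to_path tokens out) := by unfold Spec_word_to_path; infer_instance

-- ===== CLAIM (what is proved, stated in full; the proofs are below) =====
def Claim_equal_word_to_path : Prop := ∀ (tokens : List String), Dom_word_to_path tokens → Spec_word_to_path tokens (word_to_path tokens)

-- ===== LEMMAS AND PROOFS =====

-- running forward path coordinates starting from offsets (a, b); invalid tokens skipped
def pathFrom (a b : Int) : List String → List Int × List Int
  | [] => ([], [])
  | t :: ts =>
    if t = "0" then
      let p := pathFrom (a + 1) b ts; ((a + 1) :: p.1, b :: p.2)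
    else if t = "1" then
      let p := pathFrom a (b + 1) ts; (a :: p.1, (b + 1) :: p.2)
    else pathFrom a b ts

def cnt0 (l : List String) : Int := (l.count "0" : Int)
def cnt1 (l : List String) : Int := (l.count "1" : Int)

theorem glD (l : List Int) (y : Int) : (l ++ [y]).getLast?.getD 0 = y := by
  simp

-- A's fold computes pathFrom appended to the running state
theorem foldA_path (v : List String) :
    ∀ (xs ys : List Int) (a b : Int), xs.getLast?.getD 0 = a → ys.getLast?.getD 0 = b →
      v.foldl stepA (xs, ys) = (xs ++ (pathFrom a b v).1, ys ++ (pathFrom a b v).2) := by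
  induction v with
  | nil => intro xs ys a b _ _; simp [pathFrom]
  | cons t ts ih =>
    intro xs ys a b hx hy
    by_cases h0 : t = "0"
    · have := ih (xs ++ [a + 1]) (ys ++ [b]) (a + 1) b (glD _ _) (glD _ _)
      simp [h0, stepA, hx, hy, List.foldl_cons, this, pathFrom]
    · by_cases h1 : t = "1"
      · have := ih (xs ++ [a]) (ys ++ [b + 1]) a (b + 1) (glD _ _) (glD _ _)
        simp [h1, stepA, hx, hy, List.foldl_cons, this, pathFrom, h0]
      · have := ih xs ys a b hx hy
        simp [stepA, h0, h1, List.foldl_cons, this, pathFrom]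

-- A ignores tokens other than "0"/"1": folding over the filtered list is the same
theorem foldA_filter (tokens : List String) :
    ∀ st, tokens.foldl stepA st = (tokens.filter (fun t => t == "0" || t == "1")).foldl stepA st := by
  induction tokens with
  | nil => intro st; rfl
  | cons t ts ih =>
    intro st
    rw [List.filter_cons]
    by_cases h0 : t = "0"
    · simp [h0, ih]
    · by_cases h1 : t = "1"
      · simp [h1, ih]
      · have hb : (t == "0" || t == "1") = false := by simp [h0, h1]
        simp [hb, stepA, h0, h1, ih]

-- B's fold computes pathFrom (of the traversed list) appended, plus the final counts
theorem foldB_path (l : List String) :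
    ∀ (rxs rys : List Int) (a b : Int), (∀ t ∈ l, t = "0" ∨ t = "1") →
      l.foldl stepB ((rxs, rys), a, b) =
        ((rxs ++ (pathFrom a b l).1, rys ++ (pathFrom a b l).2), a + cnt0 l, b + cnt1 l) := by
  induction l with
  | nil => intro rxs rys a b _; simp [pathFrom, cnt0, cnt1]
  | cons t ts ih =>
    intro rxs rys a b hv
    have hts : ∀ x ∈ ts, x = "0" ∨ x = "1" := fun x hx => hv x (List.mem_cons_of_mem _ hx)
    rcases hv t List.mem_cons_self with h | h <;> subst h
    · have := ih (rxs ++ [a + 1]) (rys ++ [b]) (a + 1) b hts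
      simp [List.foldl_cons, stepB, this, pathFrom, cnt0, cnt1, List.count_cons]
      ring
    · have := ih (rxs ++ [a]) (rys ++ [b + 1]) a (b + 1) hts
      simp [List.foldl_cons, stepB, this, pathFrom, cnt0, cnt1, List.count_cons]
      ring

-- offsets shift pathFrom componentwise
theorem pathFrom_shift (l : List String) :
    ∀ a b, pathFrom a b l = ((pathFrom 0 0 l).1.map (· + a), (pathFrom 0 0 l).2.map (· + b)) := by
  induction l with
  | nil => intro a b; simp [pathFrom]
  | cons t ts ih =>
    intro a b
    by_cases h0 : t = "0"
    · simp [pathFrom, h0, ih (a + 1) b, ih 1 0, ih a b]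
      constructor
      · ring
      · intro x _; ring
    · by_cases h1 : t = "1"
      · simp [pathFrom, h0, h1, ih a (b + 1), ih 0 1, ih a b]
        constructor
        · ring
        · intro x _; ring
      · simp [pathFrom, h0, h1, ih a b]

-- appending one valid token appends one coordinate pair
theorem pathFrom_snoc (l : List String) (t : String) (ht : t = "0" ∨ t = "1") :
    ∀ a b, pathFrom a b (l ++ [t]) =
      ((pathFrom a b l).1 ++ [a + cnt0 (l ++ [t])], (pathFrom a b l).2 ++ [b + cnt1 (l ++ [t])]) := by
  induction l with
  | nil =>
    intro a b
    rcases ht with h | h <;> subst h <;> simp [pathFrom, cnt0, cnt1]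
  | cons s ss ih =>
    intro a b
    by_cases h0 : s = "0"
    · simp [pathFrom, h0, ih, cnt0, cnt1, List.count_cons]
      ring
    · by_cases h1 : s = "1"
      · simp [pathFrom, h0, h1, ih, cnt0, cnt1, List.count_cons]
        ring
      · simp [pathFrom, h0, h1, ih, cnt0, cnt1, List.count_cons]

-- the bridge: reversing B's backward distances and subtracting the totals gives A's forward path
theorem map_shift (c z : Int) (M : List Int) :
    List.map (fun r => z + c - r) M ++ [z + c]
      = List.map (fun x => x + c) (List.map (fun r => z - r) M ++ [z]) := by
  simp only [List.map_append, List.map_map, List.map_cons, List.map_nil]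
  congr 1
  apply List.map_congr_left; intro x _; simp [Function.comp]; ring

-- the bridge: reversing B's backward distances and subtracting the totals gives A's forward path
theorem bridge (v : List String) (hv : ∀ t ∈ v, t = "0" ∨ t = "1") :
    ((pathFrom 0 0 v.reverse).1.reverse).map (fun r => cnt0 v - r) ++ [cnt0 v]
        = 0 :: (pathFrom 0 0 v).1
    ∧ ((pathFrom 0 0 v.reverse).2.reverse).map (fun r => cnt1 v - r) ++ [cnt1 v]
        = 0 :: (pathFrom 0 0 v).2 := by
  induction v with
  | nil => simp [pathFrom, cnt0, cnt1]
  | cons t ts ih =>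
    have hts : ∀ x ∈ ts, x = "0" ∨ x = "1" := fun x hx => hv x (List.mem_cons_of_mem _ hx)
    obtain ⟨ih1, ih2⟩ := ih hts
    have hrev : (t :: ts).reverse = ts.reverse ++ [t] := by simp
    have ht := hv t List.mem_cons_self
    have hsnoc := pathFrom_snoc ts.reverse t ht 0 0
    have hc0r : cnt0 (ts.reverse ++ [t]) = cnt0 ts + (if t = "0" then 1 else 0) := by
      rcases ht with h | h <;> subst h <;>
        simp [cnt0, List.count_append, List.count_reverse]
    have hc1r : cnt1 (ts.reverse ++ [t]) = cnt1 ts + (if t = "1" then 1 else 0) := by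
      rcases ht with h | h <;> subst h <;>
        simp [cnt1, List.count_append, List.count_reverse]
    rcases ht with h | h <;> subst h
    · have hc0 : cnt0 ("0" :: ts) = cnt0 ts + 1 := by
        simp [cnt0, List.count_cons]
      have hc1 : cnt1 ("0" :: ts) = cnt1 ts := by
        simp [cnt1]
      simp only [hrev, hsnoc, hc0r, hc0, hc1, reduceIte, add_zero, zero_add,
        List.reverse_append, List.reverse_cons, List.reverse_nil, List.nil_append,
        List.map_cons, List.cons_append]
      constructor
      · rw [map_shift 1 (cnt0 ts) _, ih1]
        simp [pathFrom, pathFrom_shift ts 1 0]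
      · rw [ih2]
        simp [pathFrom, pathFrom_shift ts 1 0]
        simp [cnt1, List.count_append, List.count_reverse]
    · have hc0 : cnt0 ("1" :: ts) = cnt0 ts := by
        simp [cnt0]
      have hc1 : cnt1 ("1" :: ts) = cnt1 ts + 1 := by
        simp [cnt1, List.count_cons]
      simp only [hrev, hsnoc, hc0r, hc0, hc1, reduceIte, add_zero, zero_add,
        List.reverse_append, List.reverse_cons, List.reverse_nil, List.nil_append,
        List.map_cons, List.cons_append]
      constructor
      · rw [ih1]
        simp [pathFrom, pathFrom_shift ts 0 1]
      · rw [map_shift 1 (cnt1 ts) _, ih2]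
        simp [pathFrom, pathFrom_shift ts 0 1]
        simp [cnt1, List.count_append, List.count_reverse]

theorem filtered_valid (tokens : List String) :
    ∀ t ∈ tokens.filter (fun t => t == "0" || t == "1"), t = "0" ∨ t = "1" := by
  intro t ht
  have := List.of_mem_filter ht
  simpa using this

-- ===== VERDICT (by name: the statement is the Claim_ definition above) =====
theorem word_to_path_spec : Claim_equal_word_to_path := by
  intro tokens _
  unfold Spec_word_to_path word_to_path word_to_path_alt
  set v := tokens.filter (fun t => t == "0" || t == "1") with hv
  have hval := filtered_valid tokens
  have hvalr : ∀ t ∈ v.reverse, t = "0" ∨ t = "1" := by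
    intro t ht; exact hval t (List.mem_reverse.mp ht)
  rw [foldA_filter, ← hv]
  rw [foldA_path v [0] [0] 0 0 (by simp) (by simp)]
  change _ =
    (((v.reverse.foldl stepB (([0], [0]), 0, 0)).1.1.reverse).map
        (fun r => (v.reverse.foldl stepB (([0], [0]), 0, 0)).2.1 - r),
      ((v.reverse.foldl stepB (([0], [0]), 0, 0)).1.2.reverse).map
        (fun r => (v.reverse.foldl stepB (([0], [0]), 0, 0)).2.2 - r))
  rw [foldB_path v.reverse [0] [0] 0 0 hvalr]
  obtain ⟨h1, h2⟩ := bridge v hval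
  have hc0 : cnt0 v.reverse = cnt0 v := by simp [cnt0, List.count_reverse]
  have hc1 : cnt1 v.reverse = cnt1 v := by simp [cnt1, List.count_reverse]
  simp only [List.cons_append, List.nil_append, List.reverse_cons, hc0, hc1,
    List.map_append, List.map_cons, List.map_nil, zero_add, sub_zero]
  rw [← h1, ← h2]
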